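-- pv_equiv track=rewrite | github.com/duy295/local-vision-showcase | train/predict_all.py | _select_segment_representatives
-- ===== SOURCE A (Python) =====
-- def _select_segment_representatives(paths, num_segments=5):
--     """
--     Split ordered paths into segments and pick up to 3 representatives per segment:
--     head, middle, tail (unique positions only).
--     """
--     if not paths:
--         return []
--
--     segment_count = max(1, int(num_segments))
--     segment_count = min(segment_count, len(paths))
--     reps = []
--     n = len(paths)
--
--     for i in range(segment_count):
--         start = (i * n) // segment_count
--         end = ((i + 1) * n) // segment_count
--         segment = paths[start:end]
--         if not segment:
--             continue
--
--         idx_candidates = [0, len(segment) // 2, len(segment) - 1]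
--         used_local_idx = set()
--         for idx in idx_candidates:
--             if idx in used_local_idx:
--                 continue
--             used_local_idx.add(idx)
--             reps.append(segment[idx])
--
--     return reps
-- ===== SOURCE B (Python) =====
-- def _select_segment_representatives(paths, num_segments=5):
--     if not paths:
--         return []
--     n = len(paths)
--     segment_count = min(max(1, int(num_segments)), n)
--     picked = set()
--     for i in range(segment_count):
--         start = (i * n) // segment_count
--         end = ((i + 1) * n) // segment_count
--         picked.add(start)
--         picked.add(start + (end - start) // 2)
--         picked.add(end - 1)
--     return [paths[i] for i in sorted(picked)]
-- ===== Notes on version B (the rewrite author's own statement) =====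
-- stated objective: alternative
-- what changed: B never slices or dedups per segment: it collects the three candidate global indices of every segment into one index set and emits paths[i] in a single sorted pass over that set, relying on segments covering disjoint ascending index ranges.
import Mathlib
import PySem

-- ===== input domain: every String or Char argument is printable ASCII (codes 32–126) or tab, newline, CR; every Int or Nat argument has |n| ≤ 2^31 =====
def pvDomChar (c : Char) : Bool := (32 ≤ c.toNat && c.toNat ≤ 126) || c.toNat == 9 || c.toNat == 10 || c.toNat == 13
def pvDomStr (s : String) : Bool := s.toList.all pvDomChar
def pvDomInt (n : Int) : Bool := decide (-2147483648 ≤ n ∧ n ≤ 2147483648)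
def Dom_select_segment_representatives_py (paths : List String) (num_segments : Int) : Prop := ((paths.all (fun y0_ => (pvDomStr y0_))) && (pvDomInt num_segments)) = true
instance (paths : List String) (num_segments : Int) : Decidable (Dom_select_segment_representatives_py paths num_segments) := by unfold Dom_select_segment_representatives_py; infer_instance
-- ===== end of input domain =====

-- B replaces A's per-segment slicing + local-index dedup by one global index set emitted in a single sorted pass (objective: alternative decomposition, same cost).

-- ===== PORT A =====
def select_segment_representatives_py (paths : List String) (num_segments : Int) : List String :=
  if paths = [] then []
  else
    let segment_count := max 1 num_segments
    let segment_count := min segment_count (paths.length : Int)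
    let n : Int := (paths.length : Int)
    (PySem.List.pyRange 0 segment_count 1).foldl (fun reps i =>
      let start := PySem.Int.floordiv (i * n) segment_count
      let stop := PySem.Int.floordiv ((i + 1) * n) segment_count
      let segment := PySem.List.slice paths (some start) (some stop)
      if segment = [] then reps
      else
        let idx_candidates : List Int :=
          [0, PySem.Int.floordiv (segment.length : Int) 2, (segment.length : Int) - 1]
        (idx_candidates.foldl
          (fun (st : List String × PySem.Set Int) idx =>
            if PySem.Set.contains st.2 idx then st
            else (st.1 ++ [PySem.List.pyGetD segment idx ""], PySem.Set.add st.2 idx))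
          (reps, PySem.Set.empty)).1) []

-- ===== PORT B =====
def select_segment_representatives_py_alt (paths : List String) (num_segments : Int) : List String :=
  if paths = [] then []
  else
    let n : Int := (paths.length : Int)
    let segment_count := min (max 1 num_segments) n
    let picked : PySem.Set Int :=
      (PySem.List.pyRange 0 segment_count 1).foldl (fun s i =>
        let start := PySem.Int.floordiv (i * n) segment_count
        let stop := PySem.Int.floordiv ((i + 1) * n) segment_count
        PySem.Set.add (PySem.Set.add (PySem.Set.add s start)
          (start + PySem.Int.floordiv (stop - start) 2)) (stop - 1)) PySem.Set.empty
    (PySem.List.sorted picked (fun x => x) false).map (fun i => PySem.List.pyGetD paths i "")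

-- ===== PRECONDITION & SPEC =====
def Spec_select_segment_representatives_py (paths : List String) (num_segments : Int) (out : List String) : Prop := out = select_segment_representatives_py_alt paths num_segments
instance (paths : List String) (num_segments : Int) (out : List String) : Decidable (Spec_select_segment_representatives_py paths num_segments out) := by unfold Spec_select_segment_representatives_py; infer_instance

-- ===== CLAIM (what is proved, stated in full; the proofs are below) =====
def Claim_equal_select_segment_representatives_py : Prop := ∀ (paths : List String) (num_segments : Int), Dom_select_segment_representatives_py paths num_segments → Spec_select_segment_representatives_py paths num_segments (select_segment_representatives_py paths num_segments)

-- ===== LEMMAS AND PROOFS =====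

-- segment boundary (i*N)//C as a Nat
def pvBnd (N C k : Nat) : Nat := k * N / C
-- the (deduplicated, ascending) global indices A picks from segment k
def pvSeg (N C k : Nat) : List Nat :=
  if pvBnd N C (k + 1) - pvBnd N C k ≤ 1 then [pvBnd N C k]
  else if pvBnd N C (k + 1) - pvBnd N C k = 2 then [pvBnd N C k, pvBnd N C k + 1]
  else [pvBnd N C k, pvBnd N C k + (pvBnd N C (k + 1) - pvBnd N C k) / 2,
        pvBnd N C k + (pvBnd N C (k + 1) - pvBnd N C k) - 1]
-- all picked indices over the first m segments
def pvRef (N C m : Nat) : List Nat := (List.range m).flatMap (pvSeg N C)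

theorem pvBnd_le {N C k : Nat} (hC : 0 < C) (hkC : k ≤ C) : pvBnd N C k ≤ N := by
  unfold pvBnd
  calc k * N / C ≤ C * N / C := Nat.div_le_div_right (Nat.mul_le_mul_right _ hkC)
    _ = N := by rw [Nat.mul_div_cancel_left _ hC]

theorem pvBnd_lt {N C k : Nat} (hC : 0 < C) (hCN : C ≤ N) (_hk : k < C) :
    pvBnd N C k + 1 ≤ pvBnd N C (k + 1) := by
  unfold pvBnd
  have h1 : (k * N + C) / C ≤ (k + 1) * N / C := by
    apply Nat.div_le_div_right; nlinarith
  have h2 : (k * N + C) / C = k * N / C + 1 := by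
    rw [Nat.add_div_right _ hC]
  omega

theorem pvSeg_bounds {N C k : Nat} (hC : 0 < C) (hCN : C ≤ N) (hk : k < C) :
    ∀ x ∈ pvSeg N C k, pvBnd N C k ≤ x ∧ x < pvBnd N C (k + 1) := by
  have h1 := pvBnd_lt hC hCN hk
  intro x hx
  unfold pvSeg at hx
  have hq := Nat.div_add_mod (pvBnd N C (k + 1) - pvBnd N C k) 2
  have hq2 : (pvBnd N C (k + 1) - pvBnd N C k) % 2 < 2 := Nat.mod_lt _ (by omega)
  split_ifs at hx with c1 c2 <;> (simp at hx; omega)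

theorem pvSeg_pairwise {N C k : Nat} (hC : 0 < C) (hCN : C ≤ N) (hkk : k < C) :
    (pvSeg N C k).Pairwise (· < ·) := by
  have h1 := pvBnd_lt hC hCN hkk
  unfold pvSeg
  have hq := Nat.div_add_mod (pvBnd N C (k + 1) - pvBnd N C k) 2
  have hq2 : (pvBnd N C (k + 1) - pvBnd N C k) % 2 < 2 := Nat.mod_lt _ (by omega)
  split_ifs with c1 c2
  all_goals simp
  all_goals omega

theorem pvRef_bounded {N C m : Nat} (hC : 0 < C) (hCN : C ≤ N) (hm : m ≤ C) :
    ∀ x ∈ pvRef N C m, x < pvBnd N C m := by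
  induction m with
  | zero => simp [pvRef]
  | succ m ih =>
    intro x hx
    rw [pvRef, List.range_succ, List.flatMap_append] at hx
    simp only [List.mem_append] at hx
    rcases hx with hx | hx
    · have := ih (by omega) x hx
      have := pvBnd_lt hC hCN (show m < C by omega)
      omega
    · simp only [List.flatMap_cons, List.flatMap_nil, List.append_nil] at hx
      exact (pvSeg_bounds hC hCN (by omega) x hx).2

theorem pvRef_pairwise {N C m : Nat} (hC : 0 < C) (hCN : C ≤ N) (hm : m ≤ C) :
    (pvRef N C m).Pairwise (· < ·) := by
  induction m with
  | zero => simp [pvRef]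
  | succ m ih =>
    rw [pvRef, List.range_succ, List.flatMap_append]
    simp only [List.flatMap_cons, List.flatMap_nil, List.append_nil]
    rw [List.pairwise_append]
    refine ⟨ih (by omega), pvSeg_pairwise hC hCN (by omega), ?_⟩
    intro a ha b hb
    have h1 := pvRef_bounded hC hCN (show m ≤ C by omega) a ha
    have h2 := (pvSeg_bounds hC hCN (by omega) b hb).1
    omega

-- pyGetD at a Nat index is List.getD
theorem pv_pyGetD_natCast {α : Type} [Inhabited α] (xs : List α) (i : Nat) (d : α) :
    PySem.List.pyGetD xs (i : Int) d = xs.getD i d := by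
  simp only [PySem.List.pyGetD, PySem.List.pyGet?, PySem.List.pyIdx?, List.getD]
  by_cases h : i < xs.length
  · simp [h]
  · simp [h]

-- the segment's element at local index j is paths' element at s + j
theorem pv_seg_get (paths : List String) {s e j : Nat} (hj : j < e - s) :
    ((paths.drop s).take (e - s)).getD j "" = paths.getD (s + j) "" := by
  rw [List.getD, List.getD, List.getElem?_take_of_lt hj, List.getElem?_drop]

theorem innerA (seg : List String) (paths : List String) (s L : Nat) (hL : 1 ≤ L)
    (hget : ∀ j, j < L → PySem.List.pyGetD seg (j : Int) "" = paths.getD (s + j) "")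
    (reps : List String) :
    (([0, PySem.Int.floordiv ((L : Nat) : Int) 2, ((L : Nat) : Int) - 1] : List Int).foldl
        (fun (st : List String × PySem.Set Int) idx =>
          if PySem.Set.contains st.2 idx then st
          else (st.1 ++ [PySem.List.pyGetD seg idx ""], PySem.Set.add st.2 idx))
        (reps, PySem.Set.empty)).1
    = reps ++ ((if L ≤ 1 then [s] else if L = 2 then [s, s + 1]
        else [s, s + L / 2, s + L - 1]).map (fun j => paths.getD j "")) := by
  have hdiv : PySem.Int.floordiv ((L : Nat) : Int) 2 = ((L / 2 : Nat) : Int) := by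
    exact_mod_cast PySem.Int.floordiv_natCast L 2
  have hq := Nat.div_add_mod L 2
  have hq2 : L % 2 < 2 := Nat.mod_lt _ (by omega)
  by_cases hL1 : L = 1
  · subst hL1
    simp only [hdiv]
    norm_num
    rw [show ((0:Int)) = ((0:Nat) : Int) from rfl, hget 0 (by omega)]
    simp
  · by_cases hL2 : L = 2
    · subst hL2
      simp only [hdiv]
      norm_num [List.foldl_cons, List.foldl_nil, PySem.Set.add, PySem.Set.contains,
        PySem.Set.empty]
      rw [show ((0:Int)) = ((0:Nat) : Int) from rfl, hget 0 (by omega),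
        show ((1:Int)) = ((1:Nat) : Int) from rfl, hget 1 (by omega)]
      simp
    · have hL3 : 3 ≤ L := by omega
      have hq1 : 1 ≤ L / 2 := by omega
      have hqlt : L / 2 < L - 1 := by omega
      have hzq : ((L:Nat) : Int) - 1 = ((L - 1 : Nat) : Int) := by
        push_cast [Nat.cast_sub (show 1 ≤ L by omega)]; ring
      simp only [hdiv, hzq]
      have c1 : PySem.Set.contains PySem.Set.empty ((0:Int)) = false := rfl
      have c2 : PySem.Set.contains (PySem.Set.add PySem.Set.empty ((0:Int))) ((L/2 : Nat) : Int) = false := by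
        simp [PySem.Set.contains, PySem.Set.add, PySem.Set.empty]; omega
      have c3 : PySem.Set.contains (PySem.Set.add (PySem.Set.add PySem.Set.empty ((0:Int))) ((L/2 : Nat) : Int)) ((L-1 : Nat) : Int) = false := by
        simp [PySem.Set.contains, PySem.Set.add, PySem.Set.empty]
        rw [if_neg (by omega : ¬ ((L:Int) / 2 = 0))]
        simp
        constructor <;> omega
      simp only [List.foldl_cons, List.foldl_nil, c1, c2, c3, Bool.false_eq_true, if_false]
      rw [show ((0:Int)) = ((0:Nat) : Int) from rfl]
      simp only [hget 0 (by omega), hget (L/2) (by omega), hget (L-1) (by omega)]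
      rw [if_neg (by omega), if_neg hL2]
      simp [Nat.add_sub_assoc (show 1 ≤ L by omega)]

theorem stepA (paths : List String) {C k : Nat} (hC : 0 < C) (hCN : C ≤ paths.length)
    (hk : k < C) (reps : List String) :
    (if PySem.List.slice paths (some (PySem.Int.floordiv ((k : Int) * (paths.length : Int)) ((C : Nat) : Int)))
          (some (PySem.Int.floordiv (((k : Int) + 1) * (paths.length : Int)) ((C : Nat) : Int))) = [] then reps
     else
       (([0,
          PySem.Int.floordiv ((((PySem.List.slice paths (some (PySem.Int.floordiv ((k : Int) * (paths.length : Int)) ((C : Nat) : Int)))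
            (some (PySem.Int.floordiv (((k : Int) + 1) * (paths.length : Int)) ((C : Nat) : Int)))).length : Nat)) : Int) 2,
          ((((PySem.List.slice paths (some (PySem.Int.floordiv ((k : Int) * (paths.length : Int)) ((C : Nat) : Int)))
            (some (PySem.Int.floordiv (((k : Int) + 1) * (paths.length : Int)) ((C : Nat) : Int)))).length : Nat)) : Int) - 1] : List Int).foldl
         (fun (st : List String × PySem.Set Int) idx =>
           if PySem.Set.contains st.2 idx then st
           else (st.1 ++ [PySem.List.pyGetD (PySem.List.slice paths (some (PySem.Int.floordiv ((k : Int) * (paths.length : Int)) ((C : Nat) : Int)))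
            (some (PySem.Int.floordiv (((k : Int) + 1) * (paths.length : Int)) ((C : Nat) : Int)))) idx ""], PySem.Set.add st.2 idx))
         (reps, PySem.Set.empty)).1)
    = reps ++ (pvSeg paths.length C k).map (fun j => paths.getD j "") := by
  have hse := pvBnd_lt hC hCN hk
  have heN := pvBnd_le (N := paths.length) hC (show k + 1 ≤ C by omega)
  set N := paths.length with hN
  set s := pvBnd N C k with hs
  set e := pvBnd N C (k + 1) with he
  have h1 : PySem.Int.floordiv ((k : Int) * (N : Int)) (C : Int) = (s : Int) := by
    rw [← Nat.cast_mul]; exact_mod_cast PySem.Int.floordiv_natCast (k * N) C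
  have h2 : PySem.Int.floordiv (((k : Int) + 1) * (N : Int)) (C : Int) = (e : Int) := by
    have h3 : ((k : Int) + 1) * (N : Int) = (((k + 1) * N : Nat) : Int) := by push_cast; ring
    rw [h3]; exact_mod_cast PySem.Int.floordiv_natCast ((k + 1) * N) C
  rw [h1, h2, PySem.List.slice_natCast]
  set seg := (paths.drop s).take (e - s) with hseg
  have hlen : seg.length = e - s := by
    simp [hseg]; omega
  have hne : ¬ seg = [] := by
    intro hemp; rw [hemp] at hlen; simp at hlen; omega
  rw [if_neg hne, hlen]
  have hget : ∀ j, j < e - s → PySem.List.pyGetD seg (j : Int) "" = paths.getD (s + j) "" := by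
    intro j hj
    rw [pv_pyGetD_natCast, hseg, pv_seg_get paths hj]
  rw [innerA seg paths s (e - s) (by omega) hget reps]
  simp [pvSeg, ← hs, ← he]

theorem foldA (paths : List String) {C : Nat} (hC : 0 < C) (hCN : C ≤ paths.length) :
    ∀ m, m ≤ C → ∀ reps : List String,
    ((List.range m).map (fun k : Nat => (k : Int))).foldl
      (fun reps i =>
        if PySem.List.slice paths (some (PySem.Int.floordiv (i * (paths.length : Int)) ((C : Nat) : Int)))
              (some (PySem.Int.floordiv ((i + 1) * (paths.length : Int)) ((C : Nat) : Int))) = [] then reps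
         else
           (([0,
              PySem.Int.floordiv ((((PySem.List.slice paths (some (PySem.Int.floordiv (i * (paths.length : Int)) ((C : Nat) : Int)))
                (some (PySem.Int.floordiv ((i + 1) * (paths.length : Int)) ((C : Nat) : Int)))).length : Nat)) : Int) 2,
              ((((PySem.List.slice paths (some (PySem.Int.floordiv (i * (paths.length : Int)) ((C : Nat) : Int)))
                (some (PySem.Int.floordiv ((i + 1) * (paths.length : Int)) ((C : Nat) : Int)))).length : Nat)) : Int) - 1] : List Int).foldl
             (fun (st : List String × PySem.Set Int) idx =>
               if PySem.Set.contains st.2 idx then st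
               else (st.1 ++ [PySem.List.pyGetD (PySem.List.slice paths (some (PySem.Int.floordiv (i * (paths.length : Int)) ((C : Nat) : Int)))
                (some (PySem.Int.floordiv ((i + 1) * (paths.length : Int)) ((C : Nat) : Int)))) idx ""], PySem.Set.add st.2 idx))
             (reps, PySem.Set.empty)).1) reps
    = reps ++ (pvRef paths.length C m).map (fun j => paths.getD j "") := by
  intro m
  induction m with
  | zero => intro _ reps; simp [pvRef]
  | succ m ih =>
    intro hm reps
    rw [List.range_succ, List.map_append, List.foldl_append, ih (by omega)]
    rw [List.map_cons, List.map_nil, List.foldl_cons, List.foldl_nil]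
    rw [stepA paths hC hCN (show m < C by omega)]
    simp [pvRef, List.range_succ]

theorem innerB (S : PySem.Set Int) (s e : Nat) (hse : s + 1 ≤ e)
    (hout : ∀ x ∈ S, x < (s : Int)) :
    PySem.Set.add (PySem.Set.add (PySem.Set.add S ((s:Nat):Int))
        (((s:Nat):Int) + PySem.Int.floordiv (((e:Nat):Int) - ((s:Nat):Int)) 2)) (((e:Nat):Int) - 1)
    = S ++ ((if e - s ≤ 1 then [s] else if e - s = 2 then [s, s + 1]
        else [s, s + (e - s) / 2, s + (e - s) - 1]).map (fun j : Nat => (j : Int))) := by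
  have hdiff : ((e:Nat):Int) - ((s:Nat):Int) = (((e - s : Nat)):Int) := by
    push_cast [Nat.cast_sub (show s ≤ e by omega)]; ring
  have hdiv : PySem.Int.floordiv (((e - s : Nat)):Int) 2 = (((e - s) / 2 : Nat) : Int) := by
    exact_mod_cast PySem.Int.floordiv_natCast (e - s) 2
  have hq := Nat.div_add_mod (e - s) 2
  have hq2 : (e - s) % 2 < 2 := Nat.mod_lt _ (by omega)
  have hlast : ((e:Nat):Int) - 1 = (((s + (e - s) - 1 : Nat)):Int) := by
    push_cast [Nat.cast_sub (show 1 ≤ s + (e - s) by omega)]; omega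
  have hmid : ((s:Nat):Int) + (((e - s) / 2 : Nat) : Int) = (((s + (e - s) / 2 : Nat)):Int) := by
    push_cast; ring
  rw [hdiff, hdiv, hmid, hlast]
  have hcs : PySem.Set.contains S ((s:Nat):Int) = false := by
    simp [PySem.Set.contains]
    intro hmem; exact absurd (hout _ hmem) (by omega)
  have a1 : PySem.Set.add S ((s:Nat):Int) = S ++ [((s:Nat):Int)] := by
    unfold PySem.Set.add
    rw [show S.contains ((s:Nat):Int) = false from hcs]
    simp
  by_cases hL1 : e - s ≤ 1
  · have h1 : (s + (e - s) / 2 : Nat) = s := by omega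
    have h2 : (s + (e - s) - 1 : Nat) = s := by omega
    rw [h1, h2, a1, if_pos hL1]
    have hc2 : PySem.Set.contains (S ++ [((s:Nat):Int)]) ((s:Nat):Int) = true := by
      simp [PySem.Set.contains]
    have a2 : PySem.Set.add (S ++ [((s:Nat):Int)]) ((s:Nat):Int) = S ++ [((s:Nat):Int)] := by
      unfold PySem.Set.add
      rw [show (S ++ [((s:Nat):Int)]).contains ((s:Nat):Int) = true from hc2]
      simp
    rw [a2, a2]
    simp
  · by_cases hL2 : e - s = 2
    · have h1 : (s + (e - s) / 2 : Nat) = s + 1 := by omega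
      have h2 : (s + (e - s) - 1 : Nat) = s + 1 := by omega
      rw [h1, h2, a1, if_neg hL1, if_pos hL2]
      have hc2 : PySem.Set.contains (S ++ [((s:Nat):Int)]) (((s+1:Nat)):Int) = false := by
        simp [PySem.Set.contains]
        exact fun hmem => absurd (hout _ hmem) (by omega)
      have a2 : PySem.Set.add (S ++ [((s:Nat):Int)]) (((s+1:Nat)):Int)
          = S ++ [((s:Nat):Int), (((s+1:Nat)):Int)] := by
        unfold PySem.Set.add
        rw [show (S ++ [((s:Nat):Int)]).contains (((s+1:Nat)):Int) = false from hc2]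
        simp
      rw [a2]
      have hc3 : PySem.Set.contains (S ++ [((s:Nat):Int), (((s+1:Nat)):Int)]) (((s+1:Nat)):Int) = true := by
        simp [PySem.Set.contains]
      have a3 : PySem.Set.add (S ++ [((s:Nat):Int), (((s+1:Nat)):Int)]) (((s+1:Nat)):Int)
          = S ++ [((s:Nat):Int), (((s+1:Nat)):Int)] := by
        unfold PySem.Set.add
        rw [show (S ++ [((s:Nat):Int), (((s+1:Nat)):Int)]).contains (((s+1:Nat)):Int) = true from hc3]
        simp
      rw [a3]
      simp
    · have hq1 : 1 ≤ (e - s) / 2 := by omega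
      have hqlt : (e - s) / 2 < e - s - 1 := by omega
      rw [a1, if_neg hL1, if_neg hL2]
      have hc2 : PySem.Set.contains (S ++ [((s:Nat):Int)]) (((s + (e - s) / 2 : Nat)):Int) = false := by
        simp [PySem.Set.contains]
        constructor
        · exact fun hmem => absurd (hout _ hmem) (by omega)
        · omega
      have a2 : PySem.Set.add (S ++ [((s:Nat):Int)]) (((s + (e - s) / 2 : Nat)):Int)
          = S ++ [((s:Nat):Int), (((s + (e - s) / 2 : Nat)):Int)] := by
        unfold PySem.Set.add
        rw [show (S ++ [((s:Nat):Int)]).contains (((s + (e - s) / 2 : Nat)):Int) = false from hc2]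
        simp
      rw [a2]
      have hc3 : PySem.Set.contains (S ++ [((s:Nat):Int), (((s + (e - s) / 2 : Nat)):Int)])
          (((s + (e - s) - 1 : Nat)):Int) = false := by
        simp [PySem.Set.contains]
        refine ⟨fun hmem => absurd (hout _ hmem) (by omega), by omega, by omega⟩
      have a3 : PySem.Set.add (S ++ [((s:Nat):Int), (((s + (e - s) / 2 : Nat)):Int)])
          (((s + (e - s) - 1 : Nat)):Int)
          = S ++ [((s:Nat):Int), (((s + (e - s) / 2 : Nat)):Int), (((s + (e - s) - 1 : Nat)):Int)] := by
        unfold PySem.Set.add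
        rw [show (S ++ [((s:Nat):Int), (((s + (e - s) / 2 : Nat)):Int)]).contains (((s + (e - s) - 1 : Nat)):Int) = false from hc3]
        simp
      rw [a3]
      simp

theorem foldB (paths : List String) {C : Nat} (hC : 0 < C) (hCN : C ≤ paths.length) :
    ∀ m, m ≤ C →
    ((List.range m).map (fun k : Nat => (k : Int))).foldl
      (fun s i =>
        PySem.Set.add (PySem.Set.add (PySem.Set.add s (PySem.Int.floordiv (i * (paths.length : Int)) ((C : Nat) : Int)))
          (PySem.Int.floordiv (i * (paths.length : Int)) ((C : Nat) : Int) +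
            PySem.Int.floordiv (PySem.Int.floordiv ((i + 1) * (paths.length : Int)) ((C : Nat) : Int) -
              PySem.Int.floordiv (i * (paths.length : Int)) ((C : Nat) : Int)) 2))
          (PySem.Int.floordiv ((i + 1) * (paths.length : Int)) ((C : Nat) : Int) - 1)) PySem.Set.empty
    = (pvRef paths.length C m).map (fun j : Nat => (j : Int)) := by
  intro m
  induction m with
  | zero => simp [pvRef, PySem.Set.empty]
  | succ m ih =>
    intro hm
    rw [List.range_succ, List.map_append, List.foldl_append, ih (by omega)]
    rw [List.map_cons, List.map_nil, List.foldl_cons, List.foldl_nil]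
    have hse := pvBnd_lt hC hCN (show m < C by omega)
    set N := paths.length with hN
    set s := pvBnd N C m with hs
    set e := pvBnd N C (m + 1) with he
    have h1 : PySem.Int.floordiv ((m : Int) * (N : Int)) (C : Int) = (s : Int) := by
      rw [← Nat.cast_mul]; exact_mod_cast PySem.Int.floordiv_natCast (m * N) C
    have h2 : PySem.Int.floordiv (((m : Int) + 1) * (N : Int)) (C : Int) = (e : Int) := by
      have h3 : ((m : Int) + 1) * (N : Int) = (((m + 1) * N : Nat) : Int) := by push_cast; ring
      rw [h3]; exact_mod_cast PySem.Int.floordiv_natCast ((m + 1) * N) C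
    rw [h1, h2]
    have hout : ∀ x ∈ (pvRef N C m).map (fun j : Nat => (j : Int)), x < (s : Int) := by
      intro x hx
      obtain ⟨u, hu, rfl⟩ := List.mem_map.mp hx
      have := pvRef_bounded hC hCN (show m ≤ C by omega) u hu
      exact_mod_cast this
    rw [innerB _ s e (by omega) hout]
    have hmatch : pvSeg N C m = (if e - s ≤ 1 then [s] else if e - s = 2 then [s, s + 1]
        else [s, s + (e - s) / 2, s + (e - s) - 1]) := by
      simp [pvSeg, ← hs, ← he]
    rw [show pvRef N C (m + 1) = pvRef N C m ++ pvSeg N C m from by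
      rw [pvRef, pvRef, List.range_succ]; simp]
    rw [List.map_append, hmatch]

theorem main_eq (paths : List String) (num_segments : Int) :
    select_segment_representatives_py paths num_segments
      = select_segment_representatives_py_alt paths num_segments := by
  by_cases hemp : paths = []
  · simp [hemp, select_segment_representatives_py, select_segment_representatives_py_alt]
  · simp only [select_segment_representatives_py, select_segment_representatives_py_alt,
      if_neg hemp]
    set N := paths.length with hN
    have hN1 : 1 ≤ N := by
      have := List.length_pos_iff.mpr hemp; omega
    set sc : Int := min (max 1 num_segments) (N : Int) with hsc
    have hsc1 : 1 ≤ sc := by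
      rw [hsc]; rcases le_total (1:Int) num_segments with h | h <;> simp <;> omega
    have hscN : sc ≤ (N : Int) := min_le_right _ _
    set C : Nat := sc.toNat with hC
    have hCeq : (C : Int) = sc := by rw [hC]; omega
    have hC0 : 0 < C := by omega
    have hCN : C ≤ N := by omega
    have hrange : PySem.List.pyRange 0 ((C : Nat) : Int) 1 = (List.range C).map (fun k : Nat => (k : Int)) := by
      rw [PySem.List.pyRange_one]
      simp
    rw [← hCeq, hrange]
    rw [foldA paths hC0 hCN C (le_refl C) [], foldB paths hC0 hCN C (le_refl C)]
    have hsorted : PySem.List.sorted ((pvRef N C C).map (fun j : Nat => (j : Int))) (fun x => x) false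
        = (pvRef N C C).map (fun j : Nat => (j : Int)) := by
      have hp := pvRef_pairwise (N := N) hC0 hCN (le_refl C)
      apply PySem.List.sorted_eq_of_perm_of_pairwise_lt
      · exact List.Perm.refl _
      · exact List.Pairwise.map _ (fun a b h => by exact_mod_cast h) hp
    rw [hsorted, List.map_map, List.nil_append]
    apply List.map_congr_left
    intro j _
    show paths.getD j "" = PySem.List.pyGetD paths (j : Int) ""
    exact (pv_pyGetD_natCast paths j "").symm

-- ===== VERDICT (by name: the statement is the Claim_ definition above) =====
theorem select_segment_representatives_py_spec : Claim_equal_select_segment_representatives_py := by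
  intro paths ns _
  unfold Spec_select_segment_representatives_py
  exact main_eq paths ns
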